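-- pv_equiv track=rewrite | github.com/mmkzer0/advent-of-code-2023 | python/day3/gears.py | getNumMap
-- ===== SOURCE A (Python) =====
-- def getNumMap(arr, index):
--     line = arr[index]
--     numTmp, startIndex, stopIndex = str(), None, None
--     numMap = []
--
--     for index, char in enumerate(line):
--         if char.isdigit():
--             numTmp += char
--             if startIndex == None:
--                 startIndex = index
--         elif numTmp != str():
--             stopIndex = index - 1
--             numMap.append([int(numTmp), startIndex, stopIndex])
--             numTmp, startIndex, stopIndex = str(), None, None
--
--     if numTmp != str():
--         numMap.append([int(numTmp), startIndex, len(line)-1])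
--
--     return numMap
-- ===== SOURCE B (Python) =====
-- def getNumMap(arr, index):
--     line = arr[index]
--     numMap = []
--     i, n = 0, len(line)
--     while i < n:
--         if line[i].isdigit():
--             j = i
--             while j < n and line[j].isdigit():
--                 j += 1
--             numMap.append([int(line[i:j]), i, j - 1])
--             i = j
--         else:
--             i += 1
--     return numMap
-- ===== Notes on version B (the rewrite author's own statement) =====
-- stated objective: simpler
-- what changed: B replaces A's accumulate-and-flush state machine (digit buffer, startIndex/stopIndex sentinels, post-loop flush) with a two-pointer scan that, at the start of each digit run, advances a second pointer to the run's end and emits [int(run), start, end] directly, needing no carried state or final flush.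
import Mathlib
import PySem

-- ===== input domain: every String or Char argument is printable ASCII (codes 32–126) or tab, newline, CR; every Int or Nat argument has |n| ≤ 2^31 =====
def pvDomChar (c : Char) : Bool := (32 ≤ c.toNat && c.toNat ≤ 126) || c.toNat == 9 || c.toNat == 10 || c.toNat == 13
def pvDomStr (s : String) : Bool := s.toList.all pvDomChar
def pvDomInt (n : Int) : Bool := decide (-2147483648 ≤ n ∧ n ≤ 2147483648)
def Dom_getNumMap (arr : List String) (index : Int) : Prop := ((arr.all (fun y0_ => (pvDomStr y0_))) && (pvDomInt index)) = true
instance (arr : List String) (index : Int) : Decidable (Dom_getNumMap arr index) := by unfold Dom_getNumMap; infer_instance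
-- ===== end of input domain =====

-- B replaces A's accumulate-and-flush state machine with a two-pointer run scan; same O(n) cost, simpler.
-- A mutates nothing; equivalence is about the return value on in-range indices (Pre_ excludes the IndexError of arr[index]).

-- int(s) for a nonempty all-digit string s (exact on that domain, which is the only way both Pythons call int())
def pvDigitsToInt (cs : List Char) : Int :=
  (cs.foldl (fun a c => a * 10 + (c.toNat - 48)) 0 : Nat)

-- ===== PORT A =====
-- the for-loop of A as structural recursion over the same state (buffer, startIndex, accumulated numMap);
-- i is the enumerate counter
def pvLoopA : List Char → Nat → List Char → Option Int → List (List Int) → (List Char × Option Int × List (List Int))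
  | [], _, tmp, start, acc => (tmp, start, acc)
  | c :: rest, i, tmp, start, acc =>
    if PySem.Chars.isdigit c then
      pvLoopA rest (i + 1) (tmp ++ [c]) (if start = none then some (i : Int) else start) acc
    else if tmp ≠ [] then
      pvLoopA rest (i + 1) [] none (acc ++ [[pvDigitsToInt tmp, start.getD 0, (i : Int) - 1]])
    else
      pvLoopA rest (i + 1) tmp start acc

def getNumMap (arr : List String) (index : Int) : List (List Int) :=
  match PySem.List.pyGet? arr index with
  | none => []   -- IndexError in Python; excluded by Pre_
  | some line =>
    let cs := line.toList
    match pvLoopA cs 0 [] none [] with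
    | (tmp, start, acc) =>
      if tmp ≠ [] then acc ++ [[pvDigitsToInt tmp, start.getD 0, (cs.length : Int) - 1]] else acc

-- ===== PORT B =====
-- two-pointer scan: at a digit, take the whole run (the inner while loop) and emit it at once
def pvRunsB : List Char → Nat → List (List Int)
  | [], _ => []
  | c :: rest, i =>
    if PySem.Chars.isdigit c then
      let run := c :: rest.takeWhile PySem.Chars.isdigit
      [pvDigitsToInt run, (i : Int), (i : Int) + run.length - 1]
        :: pvRunsB (rest.dropWhile PySem.Chars.isdigit) (i + run.length)
    else
      pvRunsB rest (i + 1)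
  termination_by cs _ => cs.length
  decreasing_by
  · simpa using Nat.lt_succ_of_le (List.length_dropWhile_le _ _)
  · simp

def getNumMap_alt (arr : List String) (index : Int) : List (List Int) :=
  match PySem.List.pyGet? arr index with
  | none => []   -- IndexError in Python; excluded by Pre_
  | some line => pvRunsB line.toList 0

-- ===== PRECONDITION & SPEC =====
-- Pre_ excludes exactly the out-of-range index, on which Python A raises IndexError
def Pre_getNumMap (arr : List String) (index : Int) : Prop :=
  PySem.Raise.InRange arr.length index
instance (arr : List String) (index : Int) : Decidable (Pre_getNumMap arr index) := by
  unfold Pre_getNumMap; infer_instance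

def pvWitness_getNumMap : List String × Int := (["a12b.7"], 0)

def Spec_getNumMap (arr : List String) (index : Int) (out : List (List Int)) : Prop := out = getNumMap_alt arr index
instance (arr : List String) (index : Int) (out : List (List Int)) : Decidable (Spec_getNumMap arr index out) := by unfold Spec_getNumMap; infer_instance

-- ===== CLAIM (what is proved, stated in full; the proofs are below) =====
def Claim_equal_getNumMap : Prop := ∀ (arr : List String) (index : Int), Dom_getNumMap arr index → Pre_getNumMap arr index → Spec_getNumMap arr index (getNumMap arr index)

-- ===== LEMMAS AND PROOFS =====

-- finalize A's loop state with the original line length n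
def pvFinish (n : Nat) : (List Char × Option Int × List (List Int)) → List (List Int)
  | (tmp, start, acc) =>
    if tmp ≠ [] then acc ++ [[pvDigitsToInt tmp, start.getD 0, (n : Int) - 1]] else acc

-- the combined invariant: E1 (empty buffer) and E2 (nonempty buffer mid-run)
theorem pvMain (n : Nat) : ∀ cs : List Char, cs.length ≤ n →
    (∀ (i : Nat) (acc : List (List Int)),
      pvFinish (i + cs.length) (pvLoopA cs i [] none acc) = acc ++ pvRunsB cs i) ∧
    (∀ (i : Nat) (tmp : List Char) (s : Int) (acc : List (List Int)), tmp ≠ [] →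
      pvFinish (i + cs.length) (pvLoopA cs i tmp (some s) acc) =
        acc ++ [[pvDigitsToInt (tmp ++ cs.takeWhile PySem.Chars.isdigit), s,
                 (i : Int) + (cs.takeWhile PySem.Chars.isdigit).length - 1]]
            ++ pvRunsB (cs.dropWhile PySem.Chars.isdigit) (i + (cs.takeWhile PySem.Chars.isdigit).length)) := by
  induction n with
  | zero =>
    intro cs hlen
    have hcs : cs = [] := List.eq_nil_of_length_eq_zero (Nat.le_zero.mp hlen)
    subst hcs
    constructor
    · intro i acc; simp [pvLoopA, pvFinish, pvRunsB]
    · intro i tmp s acc htmp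
      simp [pvLoopA, pvFinish, pvRunsB, htmp]
  | succ m ih =>
    intro cs hlen
    match cs with
    | [] =>
      constructor
      · intro i acc; simp [pvLoopA, pvFinish, pvRunsB]
      · intro i tmp s acc htmp
        simp [pvLoopA, pvFinish, pvRunsB, htmp]
    | c :: rest =>
      have hrest : rest.length ≤ m := by simpa using Nat.succ_le_succ_iff.mp hlen
      have hdrop : (rest.dropWhile PySem.Chars.isdigit).length ≤ m :=
        le_trans (List.length_dropWhile_le _ _) hrest
      constructor
      · -- E1: buffer empty
        intro i acc
        by_cases hd : PySem.Chars.isdigit c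
        · -- start a run: switch to E2 with buffer [c]
          have e2 := ((ih rest hrest).2) (i + 1) [c] (i : Int) acc (by simp)
          rw [pvRunsB]
          simp only [pvLoopA, hd, if_true, List.nil_append]
          have harith : i + 1 + rest.length = i + (c :: rest).length := by simp; omega
          rw [harith] at e2
          rw [e2]
          simp
          constructor
          · ring_nf
          · have : i + 1 + (rest.takeWhile PySem.Chars.isdigit).length
                = i + ((rest.takeWhile PySem.Chars.isdigit).length + 1) := by omega
            rw [this]
        · -- skip a non-digit, buffer stays empty
          have e1 := ((ih rest hrest).1) (i + 1) acc
          rw [pvRunsB]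
          unfold pvLoopA
          rw [if_neg (by simp [hd]), if_neg (by simp)]
          have harith : i + 1 + rest.length = i + (c :: rest).length := by simp; omega
          rw [harith] at e1
          simpa [hd] using e1
      · -- E2: buffer nonempty, start = some s
        intro i tmp s acc htmp
        by_cases hd : PySem.Chars.isdigit c
        · -- extend the run
          have e2 := ((ih rest hrest).2) (i + 1) (tmp ++ [c]) s acc (by simp)
          simp only [pvLoopA, hd, if_true, if_neg (by simp : ¬ (some s = none))]
          have harith : i + 1 + rest.length = i + (c :: rest).length := by simp; omega
          rw [harith] at e2
          rw [e2]
          simp [List.takeWhile, hd, List.dropWhile, List.append_assoc]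
          constructor
          · ring_nf
          · have : i + 1 + (rest.takeWhile PySem.Chars.isdigit).length
                = i + ((rest.takeWhile PySem.Chars.isdigit).length + 1) := by omega
            rw [this]
        · -- flush the buffer at the non-digit, then continue with empty buffer
          have e1 := ((ih rest hrest).1) (i + 1)
            (acc ++ [[pvDigitsToInt tmp, (some s : Option Int).getD 0, (i : Int) - 1]])
          unfold pvLoopA
          rw [if_neg (by simp [hd]), if_pos htmp]
          have harith : i + 1 + rest.length = i + (c :: rest).length := by simp; omega
          rw [harith] at e1
          rw [e1]
          simp [pvRunsB, List.takeWhile, hd, List.dropWhile]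

theorem getNumMap_eq_alt (arr : List String) (index : Int) :
    getNumMap arr index = getNumMap_alt arr index := by
  unfold getNumMap getNumMap_alt
  cases h : PySem.List.pyGet? arr index with
  | none => rfl
  | some line =>
    have e1 := ((pvMain line.toList.length line.toList le_rfl).1) 0 []
    simp only [Nat.zero_add] at e1
    simpa [pvFinish] using e1

-- ===== VERDICT (by name: the statement is the Claim_ definition above) =====
theorem getNumMap_spec : Claim_equal_getNumMap := by
  intro arr index _ _
  exact getNumMap_eq_alt arr index
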